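-- pv_equiv track=rewrite | github.com/MrBrantCode/unitest_baseline | mut_generate/mist_train_cf/cf_102699/solution.py | find_longest_strings
-- ===== SOURCE A (Python) =====
-- def find_longest_strings(strings):
--     """
--     This function takes a list of strings as input and returns the string(s) with the maximum length.
--     It excludes strings containing special characters or numbers. If multiple strings have the same maximum length, all of them are returned.
--
--     Args:
--         strings (list): A list of strings.
--
--     Returns:
--         list: A list of strings with the maximum length.
--     """
--     max_length = 0
--     longest_strings = []
--
--     for string in strings:
--         if any(char.isdigit() or not char.isalnum() for char in string):
--             continue
--         if len(string) > max_length: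
--             max_length = len(string)
--             longest_strings = [string]
--         elif len(string) == max_length:
--             longest_strings.append(string)
--
--     return longest_strings
-- ===== SOURCE B (Python) =====
-- def find_longest_strings(strings):
--     valid = [s for s in strings if all((not c.isdigit()) and c.isalnum() for c in s)]
--     if not valid:
--         return []
--     max_len = max(len(s) for s in valid)
--     return [s for s in valid if len(s) == max_len]
-- ===== Notes on version B (the rewrite author's own statement) =====
-- stated objective: simpler
-- what changed: Replaces A's single running-max loop with mutated max/list state by a filter -> max -> select decomposition (three comprehension passes), preserving order and ties including the empty-string corner.
import Mathlib
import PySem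

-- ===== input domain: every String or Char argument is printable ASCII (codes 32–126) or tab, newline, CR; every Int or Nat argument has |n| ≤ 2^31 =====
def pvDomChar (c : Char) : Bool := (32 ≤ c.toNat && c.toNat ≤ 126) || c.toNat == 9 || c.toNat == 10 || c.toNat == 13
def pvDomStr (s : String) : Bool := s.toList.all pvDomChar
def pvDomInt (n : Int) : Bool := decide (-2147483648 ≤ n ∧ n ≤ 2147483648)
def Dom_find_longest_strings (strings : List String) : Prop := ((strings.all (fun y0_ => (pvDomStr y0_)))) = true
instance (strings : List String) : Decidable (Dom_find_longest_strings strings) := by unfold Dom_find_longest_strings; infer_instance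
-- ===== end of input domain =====

-- B replaces A's single running-max loop (mutable max + result list) by a filter → max → select
-- decomposition; same return value on all inputs (objective: simpler).


-- ===== PORT A =====
-- literal transliteration of A's running-max loop: state (max_length, longest_strings)
def find_longest_strings (strings : List String) : List String :=
  (strings.foldl (fun (st : Nat × List String) s =>
      if s.toList.any (fun c => PySem.Chars.isdigit c || !(PySem.Chars.isalnum c)) then st
      else if s.toList.length > st.1 then (s.toList.length, [s])
      else if s.toList.length == st.1 then (st.1, st.2 ++ [s])
      else st)
    (0, [])).2

-- ===== PORT B =====
-- transliteration of Source B: filter the valid strings, then max of lengths, then select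
def find_longest_strings_alt (strings : List String) : List String :=
  let valid := strings.filter (fun s => s.toList.all (fun c => !(PySem.Chars.isdigit c) && PySem.Chars.isalnum c))
  if valid.isEmpty then []
  else
    let maxLen := (valid.map (fun s => s.toList.length)).foldl Nat.max 0
    valid.filter (fun s => s.toList.length == maxLen)

-- ===== PRECONDITION & SPEC =====
def Spec_find_longest_strings (strings : List String) (out : List String) : Prop := out = find_longest_strings_alt strings
instance (strings : List String) (out : List String) : Decidable (Spec_find_longest_strings strings out) := by unfold Spec_find_longest_strings; infer_instance

-- ===== CLAIM (what is proved, stated in full; the proofs are below) =====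
def Claim_equal_find_longest_strings : Prop := ∀ (strings : List String), Dom_find_longest_strings strings → Spec_find_longest_strings strings (find_longest_strings strings)

-- ===== LEMMAS AND PROOFS =====

-- the valid-only loop body of A (after the "continue" is factored out as a filter)
def pvStep (st : Nat × List String) (s : String) : Nat × List String :=
  if s.toList.length > st.1 then (s.toList.length, [s])
  else if s.toList.length == st.1 then (st.1, st.2 ++ [s])
  else st

-- B's keep-predicate
def pvGood (s : String) : Bool :=
  s.toList.all (fun c => !(PySem.Chars.isdigit c) && PySem.Chars.isalnum c)

-- running maximum of the lengths, seeded with m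
def pvMaxLen : List String → Nat → Nat
  | [], m => m
  | s :: t, m => pvMaxLen t (max m s.toList.length)

lemma pvMaxLen_le (v : List String) (m : Nat) : m ≤ pvMaxLen v m := by
  induction v generalizing m with
  | nil => exact le_refl m
  | cons s t ih => exact le_trans (Nat.le_max_left _ _) (ih _)

lemma pvMaxLen_mem (v : List String) (m : Nat) {s : String} (hs : s ∈ v) :
    s.toList.length ≤ pvMaxLen v m := by
  induction v generalizing m with
  | nil => cases hs
  | cons x t ih =>
    rcases List.mem_cons.mp hs with h | h
    · subst h; exact le_trans (Nat.le_max_right m _) (pvMaxLen_le t _)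
    · exact ih _ h

lemma pvMaxLen_all_le (v : List String) (m : Nat)
    (h : ∀ s ∈ v, s.toList.length ≤ m) : pvMaxLen v m = m := by
  induction v generalizing m with
  | nil => rfl
  | cons s t ih =>
    show pvMaxLen t (max m s.toList.length) = m
    rw [Nat.max_eq_left (h s (List.mem_cons_self ..))]
    exact ih m (fun x hx => h x (List.mem_cons_of_mem _ hx))

lemma pvMaxLen_lt (v : List String) (m : Nat)
    (h : ¬ ∀ s ∈ v, s.toList.length ≤ m) : m < pvMaxLen v m := by
  push Not at h
  obtain ⟨x, hx, hlen⟩ := h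
  exact lt_of_lt_of_le hlen (pvMaxLen_mem v m hx)

lemma pvMaxLen_eq_foldl (v : List String) (m : Nat) :
    pvMaxLen v m = v.foldl (fun a s => Nat.max a s.toList.length) m := by
  induction v generalizing m with
  | nil => rfl
  | cons s t ih => exact ih _

-- A's valid-only loop computes (running max of lengths, valid strings of that length)
lemma loop_spec (v : List String) (m : Nat) (acc : List String) :
    v.foldl pvStep (m, acc)
    = (pvMaxLen v m,
       if ∀ s ∈ v, s.toList.length ≤ m
       then acc ++ v.filter (fun s => s.toList.length == m)
       else v.filter (fun s => s.toList.length == pvMaxLen v m)) := by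
  induction v generalizing m acc with
  | nil => simp [pvMaxLen]
  | cons s t ih =>
    have hmc : pvMaxLen (s :: t) m = pvMaxLen t (max m s.toList.length) := rfl
    have hnotall : m < s.toList.length → ¬ ∀ x ∈ s :: t, x.toList.length ≤ m :=
      fun hgt h => absurd (h s (List.mem_cons_self ..)) (Nat.not_le.mpr hgt)
    rcases Nat.lt_trichotomy m s.toList.length with hgt | heq | hlt
    · -- len s > m : state resets to (len s, [s])
      rw [List.foldl_cons]
      show t.foldl pvStep (pvStep (m, acc) s) = _
      rw [show pvStep (m, acc) s = (s.toList.length, [s]) by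
        simp only [pvStep]; rw [if_pos hgt]]
      rw [ih, hmc, Nat.max_eq_right (le_of_lt hgt), if_neg (hnotall hgt)]
      by_cases hall : ∀ x ∈ t, x.toList.length ≤ s.toList.length
      · rw [if_pos hall, pvMaxLen_all_le t _ hall,
          List.filter_cons_of_pos (by simp)]
        simp
      · have hMgt : s.toList.length < pvMaxLen t s.toList.length :=
          pvMaxLen_lt t _ hall
        rw [if_neg hall, List.filter_cons_of_neg
          (by simp only [beq_iff_eq]; exact Nat.ne_of_lt hMgt)]
    · -- len s = m : appended to the accumulator
      rw [List.foldl_cons]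
      show t.foldl pvStep (pvStep (m, acc) s) = _
      rw [show pvStep (m, acc) s = (m, acc ++ [s]) by
        simp only [pvStep]
        rw [if_neg (by omega), if_pos (beq_iff_eq.mpr heq.symm)]]
      rw [ih, hmc, Nat.max_eq_left (le_of_eq heq.symm)]
      by_cases hall : ∀ x ∈ t, x.toList.length ≤ m
      · rw [if_pos hall,
          if_pos (by
            intro x hx
            rcases List.mem_cons.mp hx with h | h
            · subst h; omega
            · exact hall x h),
          List.filter_cons_of_pos (by simp only [beq_iff_eq]; omega)]
        simp
      · have hMgt : m < pvMaxLen t m := pvMaxLen_lt t m hall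
        rw [if_neg hall,
          if_neg (fun h => hall (fun x hx => h x (List.mem_cons_of_mem _ hx))),
          List.filter_cons_of_neg (by simp only [beq_iff_eq]; omega)]
    · -- len s < m : skipped
      rw [List.foldl_cons]
      show t.foldl pvStep (pvStep (m, acc) s) = _
      rw [show pvStep (m, acc) s = (m, acc) by
        simp only [pvStep]
        rw [if_neg (by omega), if_neg (by simp only [beq_iff_eq]; omega)]]
      rw [ih, hmc, Nat.max_eq_left (le_of_lt hlt)]
      by_cases hall : ∀ x ∈ t, x.toList.length ≤ m
      · rw [if_pos hall,
          if_pos (by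
            intro x hx
            rcases List.mem_cons.mp hx with h | h
            · subst h; omega
            · exact hall x h),
          List.filter_cons_of_neg (by simp only [beq_iff_eq]; omega)]
      · have hMgt : m < pvMaxLen t m := pvMaxLen_lt t m hall
        rw [if_neg hall,
          if_neg (fun h => hall (fun x hx => h x (List.mem_cons_of_mem _ hx))),
          List.filter_cons_of_neg (by simp only [beq_iff_eq]; omega)]

-- A's skip-condition ("any bad char") is the negation of B's keep-condition ("all good chars")
lemma pred_compl (s : String) :
    pvGood s = !(s.toList.any fun c => PySem.Chars.isdigit c || !(PySem.Chars.isalnum c)) := by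
  unfold pvGood
  induction s.toList with
  | nil => rfl
  | cons c t ih =>
    cases h1 : PySem.Chars.isdigit c <;> cases h2 : PySem.Chars.isalnum c <;>
      simp [h1, h2, ih]

-- A = select-from-filtered, with the max seeded at 0
lemma A_eq (strings : List String) :
    find_longest_strings strings
      = (strings.filter pvGood).filter
          (fun s => s.toList.length == pvMaxLen (strings.filter pvGood) 0) := by
  unfold find_longest_strings
  have hf : strings.foldl (fun (st : Nat × List String) s =>
      if s.toList.any (fun c => PySem.Chars.isdigit c || !(PySem.Chars.isalnum c)) then st
      else if s.toList.length > st.1 then (s.toList.length, [s])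
      else if s.toList.length == st.1 then (st.1, st.2 ++ [s])
      else st) (0, [])
      = (strings.filter pvGood).foldl pvStep (0, []) := by
    rw [List.foldl_filter]
    congr 1
    funext st s
    rw [pred_compl s]
    cases h : (s.toList.any fun c => PySem.Chars.isdigit c || !(PySem.Chars.isalnum c)) <;>
      simp [pvStep]
  rw [hf, loop_spec]
  by_cases hall : ∀ s ∈ strings.filter pvGood, s.toList.length ≤ 0
  · rw [if_pos hall, pvMaxLen_all_le _ _ hall, List.nil_append]
  · rw [if_neg hall]

-- B = the same selection
lemma B_eq (strings : List String) :
    find_longest_strings_alt strings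
      = (strings.filter pvGood).filter
          (fun s => s.toList.length == pvMaxLen (strings.filter pvGood) 0) := by
  unfold find_longest_strings_alt
  rw [show (fun (s : String) => s.toList.all fun c =>
      !(PySem.Chars.isdigit c) && PySem.Chars.isalnum c) = pvGood from rfl]
  rcases hve : strings.filter pvGood with _ | ⟨x, t⟩
  · simp
  · rw [if_neg (by simp)]
    rw [List.foldl_map, ← pvMaxLen_eq_foldl]

-- ===== VERDICT (by name: the statement is the Claim_ definition above) =====
theorem find_longest_strings_spec : Claim_equal_find_longest_strings := by
  intro strings _
  unfold Spec_find_longest_strings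
  rw [A_eq, B_eq]
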